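-- pv_equiv track=rewrite | github.com/acarrasco/programa_conmigo | ep026/aoc_2017_12.py | solve
-- ===== SOURCE A (Python) =====
-- def update_sets(old_sets, new_set):
--     for s in old_sets:
--         if s & new_set:
--             new_set.update(s)
--         else:
--             yield s
--     yield new_set
--
-- def solve(input):
--     sets = []
--     for left, right in input:
--         current = set(right)
--         current.add(left)
--         sets = list(update_sets(sets, current))
--
--     part_2 = len(sets)
--     for s in sets:
--         if 0 in s:
--             return len(s), part_2
-- ===== SOURCE B (Python) =====
-- def solve(input):
--     # one flat node -> component-label map; merging relabels instead of keeping a list of sets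
--     label = {}
--     fresh = 0
--     for left, right in input:
--         nodes = [left] + list(right)
--         hit = set()
--         for x in nodes:
--             if x in label:
--                 hit.add(label[x])
--         for x in list(label):
--             if label[x] in hit:
--                 label[x] = fresh
--         for x in nodes:
--             label[x] = fresh
--         fresh += 1
--     part_2 = len(set(label.values()))
--     if 0 in label:
--         zl = label[0]
--         part_1 = sum(1 for x in label if label[x] == zl)
--         return part_1, part_2
-- ===== Notes on version B (the rewrite author's own statement) =====
-- stated objective: alternative
-- what changed: A maintains a list of disjoint sets and merges each new link-set by scanning all existing sets with a chaining generator; B replaces that data structure by a single flat node-to-component-label dictionary, collecting the labels hit by the new link line and relabelling them to one fresh label, then reading both answers off the label map.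
-- outside the precondition, e.g. on solve([(1, [2])]): A returns None, B returns None; on solve([]): A returns None, B returns None
import Mathlib
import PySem

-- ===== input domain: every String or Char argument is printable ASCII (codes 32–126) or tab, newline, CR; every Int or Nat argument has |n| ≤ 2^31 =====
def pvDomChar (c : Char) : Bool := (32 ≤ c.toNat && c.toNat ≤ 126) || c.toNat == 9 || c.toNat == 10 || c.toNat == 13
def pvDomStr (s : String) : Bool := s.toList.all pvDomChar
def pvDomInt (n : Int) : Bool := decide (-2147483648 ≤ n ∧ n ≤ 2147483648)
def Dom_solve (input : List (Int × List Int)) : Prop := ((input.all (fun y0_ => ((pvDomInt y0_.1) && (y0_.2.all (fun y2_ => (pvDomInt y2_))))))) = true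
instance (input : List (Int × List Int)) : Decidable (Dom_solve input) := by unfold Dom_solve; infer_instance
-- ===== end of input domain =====

-- B replaces A's list-of-sets with chained generator merges by a single flat node→label map that
-- is relabelled on merge (objective: alternative — a genuinely different data structure, same cost).

-- ===== PORT A =====
-- A merges each new link-set into a running list of disjoint sets, chaining unions via a generator scan.
def updateSets (oldSets : List (PySem.Set Int)) (newSet : PySem.Set Int) : List (PySem.Set Int) :=
  let st := oldSets.foldl
    (fun (st : List (PySem.Set Int) × PySem.Set Int) s =>
      if !(PySem.Set.inter s st.2).isEmpty then (st.1, PySem.Set.update st.2 s)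
      else (st.1 ++ [s], st.2)) ([], newSet)
  st.1 ++ [st.2]

def solve (input : List (Int × List Int)) : Int × Int :=
  let sets := input.foldl
    (fun sets p => updateSets sets (PySem.Set.add (PySem.Set.ofList p.2) p.1)) []
  let part2 : Int := PySem.List.len sets
  match sets.find? (fun s => PySem.Set.contains s 0) with
  | some s => (PySem.Set.len s, part2)
  | none => (0, 0)   -- Python falls through and returns None here; excluded by Pre_solve

-- ===== PORT B =====
-- B keeps one flat node → component-label dict and relabels on merge (Source B, loop for loop).
def bHit (label : PySem.Dict Int Int) (nodes : List Int) : PySem.Set Int :=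
  nodes.foldl (fun h x => if label.contains x then PySem.Set.add h (label.getD x 0) else h)
    PySem.Set.empty

def bRelabel (label : PySem.Dict Int Int) (hit : PySem.Set Int) (fresh : Int) :
    PySem.Dict Int Int :=
  label.keys.foldl
    (fun d x => if PySem.Set.contains hit (d.getD x 0) then d.insert x fresh else d) label

def bAssign (label : PySem.Dict Int Int) (nodes : List Int) (fresh : Int) :
    PySem.Dict Int Int :=
  nodes.foldl (fun d x => d.insert x fresh) label

def bStep (st : PySem.Dict Int Int × Int) (p : Int × List Int) : PySem.Dict Int Int × Int :=
  let nodes := p.1 :: p.2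
  let hit := bHit st.1 nodes
  (bAssign (bRelabel st.1 hit st.2) nodes st.2, st.2 + 1)

def solve_alt (input : List (Int × List Int)) : Int × Int :=
  let st := input.foldl bStep (PySem.Dict.empty, 0)
  let label := st.1
  let part2 : Int := ((PySem.Set.ofList label.values).length : Int)
  if label.contains 0 then
    let zl := label.getD 0 0
    (((label.keys.filter (fun x => label.getD x 0 == zl)).length : Int), part2)
  else (0, 0)   -- Source B falls through and returns None here; excluded by Pre_solve

-- ===== PRECONDITION & SPEC =====
-- Pre_ excludes inputs in which node 0 never occurs: there A (and B) fall off the end of the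
-- function and return Python None, which is not a value of the declared int-pair type.
def Pre_solve (input : List (Int × List Int)) : Prop := ∃ p ∈ input, p.1 = 0 ∨ 0 ∈ p.2
instance (input : List (Int × List Int)) : Decidable (Pre_solve input) := by
  unfold Pre_solve; infer_instance

def pvWitness_solve : (List (Int × List Int)) := [(0, [1])]

def Spec_solve (input : List (Int × List Int)) (out : Int × Int) : Prop := out = solve_alt input
instance (input : List (Int × List Int)) (out : Int × Int) : Decidable (Spec_solve input out) := by
  unfold Spec_solve; infer_instance

-- ===== CLAIM (what is proved, stated in full; the proofs are below) =====
def Claim_equal_solve : Prop := ∀ (input : List (Int × List Int)), Dom_solve input → Pre_solve input → Spec_solve input (solve input)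

-- ===== LEMMAS AND PROOFS =====
-- Semantic view: both folds build the same partition of the seen nodes,
-- compared as lists of Finsets up to permutation.

def Disj (s t : List Int) : Prop := ∀ x, x ∈ s → x ∉ t

def PA (sets : List (PySem.Set Int)) : Prop :=
  sets.Pairwise Disj ∧ ∀ s ∈ sets, s ≠ [] ∧ s.Nodup

def PB (label : PySem.Dict Int Int) (fresh : Int) : Prop :=
  label.keys.Nodup ∧ ∀ v ∈ label.values, v < fresh

def classOf (label : PySem.Dict Int Int) (ℓ : Int) : Finset Int :=
  (label.keys.filter (fun x => label.getD x 0 == ℓ)).toFinset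

def LA (sets : List (PySem.Set Int)) : List (Finset Int) := sets.map List.toFinset

def LB (label : PySem.Dict Int Int) : List (Finset Int) :=
  (PySem.Set.ofList label.values).map (classOf label)

def lstep (L : List (Finset Int)) (c : Finset Int) : List (Finset Int) :=
  L.filter (fun t => decide (Disjoint t c)) ++
    [(L.filter (fun t => !decide (Disjoint t c))).foldr (· ⊔ ·) c]

-- ---- generic small lemmas ----

lemma inter_isEmpty_iff (a b : PySem.Set Int) :
    ((PySem.Set.inter a b).isEmpty = true) ↔ ∀ x ∈ a, x ∉ b := by
  rw [List.isEmpty_iff, List.eq_nil_iff_forall_not_mem]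
  simp [PySem.Set.mem_inter]

lemma foldr_sup_mem (L : List (Finset Int)) (c : Finset Int) (x : Int) :
    x ∈ L.foldr (· ⊔ ·) c ↔ x ∈ c ∨ ∃ t ∈ L, x ∈ t := by
  induction L with
  | nil => simp
  | cons t L ih =>
    simp only [Finset.sup_eq_union] at ih
    simp only [List.foldr_cons, Finset.sup_eq_union, Finset.mem_union, List.mem_cons, ih]
    constructor
    · rintro (h | h | ⟨a, ha, hx⟩)
      exacts [Or.inr ⟨t, Or.inl rfl, h⟩, Or.inl h, Or.inr ⟨a, Or.inr ha, hx⟩]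
    · rintro (h | ⟨a, rfl | ha, hx⟩)
      exacts [Or.inr (Or.inl h), Or.inl hx, Or.inr (Or.inr ⟨a, ha, hx⟩)]

lemma lstep_perm {L1 L2 : List (Finset Int)} (c : Finset Int) (h : L1.Perm L2) :
    (lstep L1 c).Perm (lstep L2 c) := by
  unfold lstep
  exact (h.filter _).append
    (by rw [List.Perm.foldr_eq (h.filter (fun t => !decide (Disjoint t c))) c])

lemma filter_map_eq {α : Type} (f : α → Finset Int) (l : List α) (p : Finset Int → Bool) :
    (l.map f).filter p = (l.filter (fun a => p (f a))).map f := by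
  induction l with
  | nil => rfl
  | cons s l ih => by_cases h : p (f s) <;> simp [h, ih]

lemma disj_symm : Symmetric Disj := fun _ _ h x hxt hxs => h x hxs hxt

lemma interEmpty_update (t s cur : PySem.Set Int) (hd : Disj s t) :
    (PySem.Set.inter t (PySem.Set.update cur s)).isEmpty =
      (PySem.Set.inter t cur).isEmpty := by
  rw [Bool.eq_iff_iff, inter_isEmpty_iff, inter_isEmpty_iff]
  constructor
  · intro h x hxt hxc
    exact h x hxt (by simp [PySem.Set.mem_update, hxc])
  · intro h x hxt hxc
    rw [PySem.Set.mem_update] at hxc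
    rcases hxc with hxc | hxs
    · exact h x hxt hxc
    · exact hd x hxs hxt

-- ---- A-side characterization ----

lemma updateSets_eq (sets : List (PySem.Set Int)) (cur : PySem.Set Int)
    (hpw : sets.Pairwise Disj) :
    updateSets sets cur =
      sets.filter (fun s => (PySem.Set.inter s cur).isEmpty) ++
        [(sets.filter (fun s => !(PySem.Set.inter s cur).isEmpty)).foldl PySem.Set.update cur] := by
  have key : ∀ (sets : List (PySem.Set Int)) (acc : List (PySem.Set Int)) (cur : PySem.Set Int),
      sets.Pairwise Disj →
      sets.foldl
        (fun (st : List (PySem.Set Int) × PySem.Set Int) s =>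
          if !(PySem.Set.inter s st.2).isEmpty then (st.1, PySem.Set.update st.2 s)
          else (st.1 ++ [s], st.2)) (acc, cur) =
      (acc ++ sets.filter (fun s => (PySem.Set.inter s cur).isEmpty),
        (sets.filter (fun s => !(PySem.Set.inter s cur).isEmpty)).foldl PySem.Set.update cur) := by
    intro sets
    induction sets with
    | nil => intro acc cur _; simp
    | cons s sets ih =>
      intro acc cur hpw
      rw [List.pairwise_cons] at hpw
      obtain ⟨hs, htail⟩ := hpw
      by_cases hse : (PySem.Set.inter s cur).isEmpty
      · rw [List.foldl_cons, if_neg (by simp [hse])]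
        rw [ih (acc ++ [s]) cur htail]
        simp [hse, List.append_assoc]
      · rw [List.foldl_cons, if_pos (by simp [hse])]
        rw [ih acc (PySem.Set.update cur s) htail]
        have hcongr1 : sets.filter (fun t => (PySem.Set.inter t (PySem.Set.update cur s)).isEmpty)
            = sets.filter (fun t => (PySem.Set.inter t cur).isEmpty) := by
          apply List.filter_congr
          intro t ht
          rw [interEmpty_update t s cur (hs t ht)]
        have hcongr2 : sets.filter (fun t => !(PySem.Set.inter t (PySem.Set.update cur s)).isEmpty)
            = sets.filter (fun t => !(PySem.Set.inter t cur).isEmpty) := by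
          apply List.filter_congr
          intro t ht
          rw [interEmpty_update t s cur (hs t ht)]
        rw [hcongr1, hcongr2]
        simp [hse]
  unfold updateSets
  rw [key sets [] cur hpw]
  simp

lemma mem_foldl_update (l : List (PySem.Set Int)) (cur : PySem.Set Int) (x : Int) :
    x ∈ l.foldl PySem.Set.update cur ↔ x ∈ cur ∨ ∃ s ∈ l, x ∈ s := by
  induction l generalizing cur with
  | nil => simp
  | cons s l ih => simp [ih, PySem.Set.mem_update]; tauto

lemma nodup_foldl_update (l : List (PySem.Set Int)) (cur : PySem.Set Int) (h : cur.Nodup) :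
    (l.foldl PySem.Set.update cur).Nodup := by
  induction l generalizing cur with
  | nil => exact h
  | cons s l ih => exact ih _ (PySem.Set.nodup_update _ _ h)

lemma toFinset_foldl_update (l : List (PySem.Set Int)) (cur : PySem.Set Int) :
    (l.foldl PySem.Set.update cur).toFinset =
      (l.map List.toFinset).foldr (· ⊔ ·) cur.toFinset := by
  ext x
  simp only [List.mem_toFinset, mem_foldl_update, foldr_sup_mem, List.mem_map]
  constructor
  · rintro (h | ⟨s, hs, hx⟩)
    exacts [Or.inl (by simpa using h), Or.inr ⟨s.toFinset, ⟨s, hs, rfl⟩, by simpa using hx⟩]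
  · rintro (h | ⟨t, ⟨s, hs, rfl⟩, hx⟩)
    exacts [Or.inl (by simpa using h), Or.inr ⟨s, hs, by simpa using hx⟩]

lemma stepA_LA (sets : List (PySem.Set Int)) (cur : PySem.Set Int)
    (hpa : PA sets) (hcur : cur ≠ [] ∧ cur.Nodup) :
    LA (updateSets sets cur) = lstep (LA sets) cur.toFinset ∧ PA (updateSets sets cur) := by
  have hdec : (fun s : PySem.Set Int => decide (Disjoint s.toFinset cur.toFinset))
      = fun s => (PySem.Set.inter s cur).isEmpty := by
    funext s
    rw [Bool.eq_iff_iff, decide_eq_true_iff, inter_isEmpty_iff, Finset.disjoint_left]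
    simp
  have hU := updateSets_eq sets cur hpa.1
  constructor
  · rw [hU]
    unfold LA lstep
    rw [List.map_append, filter_map_eq, filter_map_eq]
    congr 1
    · congr 1
      rw [show (fun s : PySem.Set Int => decide (Disjoint (List.toFinset s) cur.toFinset)) = fun s => (PySem.Set.inter s cur).isEmpty from hdec]
    · rw [List.map_singleton, toFinset_foldl_update]
      have hneg : (fun a : PySem.Set Int => !decide (Disjoint a.toFinset cur.toFinset))
          = fun s => !(PySem.Set.inter s cur).isEmpty := by
        funext a; exact congrArg (! ·) (congrFun hdec a)
      rw [hneg]
  · rw [hU]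
    constructor
    · rw [List.pairwise_append]
      refine ⟨hpa.1.filter _, List.pairwise_singleton _ _, ?_⟩
      intro s hs t ht
      rw [List.mem_singleton] at ht; subst ht
      intro x hxs hxm
      rw [mem_foldl_update] at hxm
      have hsmem := List.mem_of_mem_filter hs
      have hsp := List.of_mem_filter hs
      rcases hxm with hxc | ⟨t', ht', hxt'⟩
      · exact (inter_isEmpty_iff s cur).mp hsp x hxs hxc
      · have ht'mem := List.mem_of_mem_filter ht'
        have ht'p := List.of_mem_filter ht'
        have hne : s ≠ t' := by rintro rfl; rw [hsp] at ht'p; simp at ht'p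
        exact List.Pairwise.forall disj_symm hpa.1 hsmem ht'mem hne x hxs hxt'
    · intro s hs
      rw [List.mem_append] at hs
      rcases hs with hs | hs
      · exact hpa.2 s (List.mem_of_mem_filter hs)
      · rw [List.mem_singleton] at hs; subst hs
        obtain ⟨x, hx⟩ := List.exists_mem_of_ne_nil cur hcur.1
        refine ⟨List.ne_nil_of_mem ((mem_foldl_update _ _ x).mpr (Or.inl hx)), ?_⟩
        exact nodup_foldl_update _ _ hcur.2

lemma mem_updateSets (sets : List (PySem.Set Int)) (cur : PySem.Set Int) (x : Int)
    (h : (∃ s ∈ sets, x ∈ s) ∨ x ∈ cur) : ∃ s ∈ updateSets sets cur, x ∈ s := by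
  have key : ∀ (sets : List (PySem.Set Int)) (acc : List (PySem.Set Int)) (cur : PySem.Set Int),
      ((∃ s ∈ sets, x ∈ s) ∨ (∃ s ∈ acc, x ∈ s) ∨ x ∈ cur) →
      (∃ s ∈ (sets.foldl
        (fun (st : List (PySem.Set Int) × PySem.Set Int) s =>
          if !(PySem.Set.inter s st.2).isEmpty then (st.1, PySem.Set.update st.2 s)
          else (st.1 ++ [s], st.2)) (acc, cur)).1, x ∈ s) ∨
        x ∈ (sets.foldl
        (fun (st : List (PySem.Set Int) × PySem.Set Int) s =>
          if !(PySem.Set.inter s st.2).isEmpty then (st.1, PySem.Set.update st.2 s)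
          else (st.1 ++ [s], st.2)) (acc, cur)).2 := by
    intro sets
    induction sets with
    | nil =>
      intro acc cur h
      simp only [List.foldl_nil]
      rcases h with ⟨s, hs, _⟩ | h
      · simp at hs
      · exact h
    | cons s sets ih =>
      intro acc cur h
      rw [List.foldl_cons]
      by_cases hse : (!(PySem.Set.inter s cur).isEmpty) = true
      · rw [if_pos hse]
        apply ih
        rcases h with ⟨t, ht, hxt⟩ | h | h
        · rcases List.mem_cons.mp ht with rfl | ht
          · right; right; rw [PySem.Set.mem_update]; right; exact hxt
          · left; exact ⟨t, ht, hxt⟩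
        · right; left; exact h
        · right; right; rw [PySem.Set.mem_update]; left; exact h
      · rw [if_neg hse]
        apply ih
        rcases h with ⟨t, ht, hxt⟩ | h | h
        · rcases List.mem_cons.mp ht with rfl | ht
          · right; left; exact ⟨t, by simp, hxt⟩
          · left; exact ⟨t, ht, hxt⟩
        · right; left; rcases h with ⟨t, ht, hxt⟩; exact ⟨t, by simp [ht], hxt⟩
        · right; right; exact h
  unfold updateSets
  have := key sets [] cur (by rcases h with h | h; exacts [Or.inl h, Or.inr (Or.inr h)])
  rcases this with ⟨s, hs, hxs⟩ | hx
  · exact ⟨s, List.mem_append_left _ hs, hxs⟩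
  · exact ⟨_, List.mem_append_right _ (List.mem_singleton.mpr rfl), hx⟩

-- ---- B-side characterization ----

lemma contains_get? (label : PySem.Dict Int Int) (x : Int) :
    label.contains x = true ↔ ∃ v, label.get? x = some v := by
  rw [PySem.Dict.contains_eq_isSome_get?]
  exact Option.isSome_iff_exists

lemma bHit_mem (label : PySem.Dict Int Int) (nodes : List Int) (ℓ : Int) :
    ℓ ∈ bHit label nodes ↔ ∃ x ∈ nodes, label.get? x = some ℓ := by
  have key : ∀ (nodes : List Int) (h0 : PySem.Set Int),
      ℓ ∈ nodes.foldl
        (fun h x => if label.contains x then PySem.Set.add h (label.getD x 0) else h) h0 ↔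
      ℓ ∈ h0 ∨ ∃ x ∈ nodes, label.get? x = some ℓ := by
    intro nodes
    induction nodes with
    | nil => intro h0; simp
    | cons x nodes ih =>
      intro h0
      rw [List.foldl_cons]
      by_cases hc : label.contains x
      · obtain ⟨v, hv⟩ := (contains_get? label x).mp hc
        have hg : label.getD x 0 = v := PySem.Dict.getD_of_get?_eq_some label 0 hv
        rw [if_pos hc, ih, PySem.Set.mem_add, hg]
        constructor
        · rintro ((h | rfl) | h)
          · exact Or.inl h
          · exact Or.inr ⟨x, List.mem_cons_self, hv⟩
          · obtain ⟨t, ht, hg⟩ := h; exact Or.inr ⟨t, List.mem_cons_of_mem _ ht, hg⟩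
        · rintro (h | ⟨t, ht, hgt⟩)
          · exact Or.inl (Or.inl h)
          · rcases List.mem_cons.mp ht with rfl | ht
            · rw [hv] at hgt; exact Or.inl (Or.inr (Option.some_inj.mp hgt).symm)
            · exact Or.inr ⟨t, ht, hgt⟩
      · have hn : label.get? x = none := by
          cases h : label.get? x with
          | none => rfl
          | some v => exact absurd ((contains_get? label x).mpr ⟨v, h⟩) hc
        rw [if_neg hc, ih]
        constructor
        · rintro (h | ⟨t, ht, hg⟩)
          · exact Or.inl h
          · exact Or.inr ⟨t, List.mem_cons_of_mem _ ht, hg⟩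
        · rintro (h | ⟨t, ht, hgt⟩)
          · exact Or.inl h
          · rcases List.mem_cons.mp ht with rfl | ht
            · rw [hn] at hgt; cases hgt
            · exact Or.inr ⟨t, ht, hgt⟩
  unfold bHit
  rw [key nodes PySem.Set.empty]
  simp [PySem.Set.empty]

lemma bRelabel_get? (label : PySem.Dict Int Int) (hit : PySem.Set Int) (fresh : Int)
    (hnd : label.keys.Nodup) (y : Int) :
    (bRelabel label hit fresh).get? y =
      (label.get? y).map (fun ℓ => if ℓ ∈ hit then fresh else ℓ) := by
  have key : ∀ (ks : List Int) (d : PySem.Dict Int Int), ks.Nodup →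
      (∀ x ∈ ks, d.get? x = label.get? x ∧ (label.get? x).isSome) →
      ∀ y, (ks.foldl
          (fun d x => if PySem.Set.contains hit (d.getD x 0) then d.insert x fresh else d) d).get? y
        = if y ∈ ks then (label.get? y).map (fun ℓ => if ℓ ∈ hit then fresh else ℓ)
          else d.get? y := by
    intro ks
    induction ks with
    | nil => intro d _ _ y; simp
    | cons x ks ih =>
      intro d hnd' hd y
      obtain ⟨hxks, hndk⟩ := List.nodup_cons.mp hnd'
      rw [List.foldl_cons]
      obtain ⟨hdx, hsome⟩ := hd x List.mem_cons_self
      obtain ⟨v, hv⟩ := Option.isSome_iff_exists.mp hsome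
      have hgv : d.getD x 0 = v := by rw [PySem.Dict.getD_eq_get?_getD, hdx, hv]; rfl
      have htail : ∀ t ∈ ks,
          (if PySem.Set.contains hit (d.getD x 0) then d.insert x fresh else d).get? t
            = label.get? t ∧ (label.get? t).isSome := by
        intro t ht
        have hne : t ≠ x := fun h => hxks (h ▸ ht)
        refine ⟨?_, (hd t (List.mem_cons_of_mem _ ht)).2⟩
        split
        · rw [PySem.Dict.get?_insert_of_ne _ _ hne]
          exact (hd t (List.mem_cons_of_mem _ ht)).1
        · exact (hd t (List.mem_cons_of_mem _ ht)).1
      rw [ih _ hndk htail y]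
      by_cases hyk : y ∈ ks
      · rw [if_pos hyk, if_pos (List.mem_cons_of_mem _ hyk)]
      · rw [if_neg hyk]
        by_cases hyx : y = x
        · subst hyx
          rw [if_pos List.mem_cons_self, hv, hgv]
          by_cases hvh : PySem.Set.contains hit v
          · rw [if_pos hvh, PySem.Dict.get?_insert_self]
            have : v ∈ hit := (PySem.Set.contains_iff hit v).mp hvh
            simp [this]
          · rw [if_neg hvh, hdx, hv]
            have : v ∉ hit := fun h => hvh ((PySem.Set.contains_iff hit v).mpr h)
            simp [this]
        · have hmem : y ∉ x :: ks := by simp [hyx, hyk]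
          rw [if_neg hmem]
          split
          · rw [PySem.Dict.get?_insert_of_ne _ _ hyx]
          · rfl
  unfold bRelabel
  have hhyp : ∀ x ∈ label.keys, label.get? x = label.get? x ∧ (label.get? x).isSome := by
    intro x hx
    refine ⟨rfl, ?_⟩
    rw [← PySem.Dict.contains_eq_isSome_get?]
    exact (PySem.Dict.contains_iff_mem_keys label x).mpr hx
  rw [key label.keys label hnd hhyp y]
  by_cases hy : y ∈ label.keys
  · rw [if_pos hy]
  · rw [if_neg hy, (PySem.Dict.get?_eq_none_iff_not_mem_keys label y).mpr hy]
    rfl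

lemma bRelabel_keys (label : PySem.Dict Int Int) (hit : PySem.Set Int) (fresh : Int) :
    (bRelabel label hit fresh).keys = label.keys := by
  have key : ∀ (ks : List Int) (d : PySem.Dict Int Int),
      (∀ x ∈ ks, d.contains x = true) →
      (ks.foldl
        (fun d x => if PySem.Set.contains hit (d.getD x 0) then d.insert x fresh else d) d).keys
        = d.keys := by
    intro ks
    induction ks with
    | nil => intro d _; simp
    | cons x ks ih =>
      intro d hd
      rw [List.foldl_cons]
      have hcx := hd x List.mem_cons_self
      have htail : ∀ t ∈ ks,
          (if PySem.Set.contains hit (d.getD x 0) then d.insert x fresh else d).contains t = true := by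
        intro t ht
        split
        · rw [PySem.Dict.contains_insert]
          simp [hd t (List.mem_cons_of_mem _ ht)]
        · exact hd t (List.mem_cons_of_mem _ ht)
      rw [ih _ htail]
      split
      · exact PySem.Dict.keys_insert_of_contains _ _ hcx
      · rfl
  unfold bRelabel
  exact key label.keys label
    (fun x hx => (PySem.Dict.contains_iff_mem_keys label x).mpr hx)

lemma bAssign_get? (label : PySem.Dict Int Int) (nodes : List Int) (fresh : Int) (y : Int) :
    (bAssign label nodes fresh).get? y =
      if y ∈ nodes then some fresh else label.get? y := by
  unfold bAssign
  induction nodes generalizing label with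
  | nil => simp
  | cons x nodes ih =>
    rw [List.foldl_cons, ih (label.insert x fresh)]
    by_cases hyn : y ∈ nodes
    · rw [if_pos hyn, if_pos (List.mem_cons_of_mem _ hyn)]
    · rw [if_neg hyn]
      by_cases hyx : y = x
      · subst hyx
        rw [if_pos List.mem_cons_self, PySem.Dict.get?_insert_self]
      · rw [if_neg (by simp [hyx, hyn]), PySem.Dict.get?_insert_of_ne _ _ hyx]

lemma bAssign_keys (label : PySem.Dict Int Int) (nodes : List Int) (fresh : Int) :
    (bAssign label nodes fresh).keys = PySem.Set.update label.keys nodes := by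
  unfold bAssign
  exact PySem.Dict.keys_foldl_insert nodes (fun _ _ => fresh) label

-- value of the merged dict at any point
lemma bStep_get? (label : PySem.Dict Int Int) (fresh : Int) (p : Int × List Int)
    (hnd : label.keys.Nodup) (y : Int) :
    (bStep (label, fresh) p).1.get? y =
      if y ∈ p.1 :: p.2 then some fresh
      else (label.get? y).map
        (fun ℓ => if ℓ ∈ bHit label (p.1 :: p.2) then fresh else ℓ) := by
  show (bAssign (bRelabel label (bHit label (p.1 :: p.2)) fresh) (p.1 :: p.2) fresh).get? y = _
  rw [bAssign_get?, bRelabel_get? label _ fresh hnd y]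

lemma bStep_keys (label : PySem.Dict Int Int) (fresh : Int) (p : Int × List Int) :
    (bStep (label, fresh) p).1.keys = PySem.Set.update label.keys (p.1 :: p.2) := by
  show (bAssign (bRelabel label (bHit label (p.1 :: p.2)) fresh) (p.1 :: p.2) fresh).keys = _
  rw [bAssign_keys, bRelabel_keys]

lemma mem_keys_iff_get? (label : PySem.Dict Int Int) (y : Int) :
    y ∈ label.keys ↔ ∃ ℓ, label.get? y = some ℓ := by
  rw [← PySem.Dict.contains_iff_mem_keys, contains_get?]

lemma mem_classOf (label : PySem.Dict Int Int) (ℓ y : Int) :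
    y ∈ classOf label ℓ ↔ label.get? y = some ℓ := by
  unfold classOf
  rw [List.mem_toFinset, List.mem_filter]
  constructor
  · rintro ⟨hk, hb⟩
    obtain ⟨v, hv⟩ := (mem_keys_iff_get? label y).mp hk
    have hg := PySem.Dict.getD_of_get?_eq_some label 0 hv
    rw [hg] at hb
    rw [hv, Option.some_inj]
    exact (beq_iff_eq (a := v)).mp hb
  · intro h
    refine ⟨(mem_keys_iff_get? label y).mpr ⟨ℓ, h⟩, ?_⟩
    rw [PySem.Dict.getD_of_get?_eq_some label 0 h]
    exact beq_self_eq_true ℓ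

lemma mem_vals (label : PySem.Dict Int Int) (hnd : label.keys.Nodup) (ℓ : Int) :
    ℓ ∈ PySem.Set.ofList label.values ↔ ∃ k, label.get? k = some ℓ := by
  rw [PySem.Set.mem_ofList, PySem.Dict.values_eq_map_keys label hnd 0, List.mem_map]
  constructor
  · rintro ⟨k, hk, rfl⟩
    obtain ⟨v, hv⟩ := (mem_keys_iff_get? label k).mp hk
    exact ⟨k, by rw [hv, PySem.Dict.getD_of_get?_eq_some label 0 hv]⟩
  · rintro ⟨k, hk⟩
    exact ⟨k, (mem_keys_iff_get? label k).mpr ⟨ℓ, hk⟩,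
      PySem.Dict.getD_of_get?_eq_some label 0 hk⟩

lemma stepB_LB (label : PySem.Dict Int Int) (fresh : Int) (p : Int × List Int)
    (hpb : PB label fresh) :
    (LB (bStep (label, fresh) p).1).Perm (lstep (LB label) (p.1 :: p.2).toFinset) ∧
      PB (bStep (label, fresh) p).1 (bStep (label, fresh) p).2 := by
  obtain ⟨hnd, hbound⟩ := hpb
  have hg' := bStep_get? label fresh p hnd
  have hk' := bStep_keys label fresh p
  have hnd' : (bStep (label, fresh) p).1.keys.Nodup := by
    rw [hk']; exact PySem.Set.nodup_update _ _ hnd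
  have hboundE : ∀ ℓ k, label.get? k = some ℓ → ℓ < fresh := by
    intro ℓ k hk
    exact hbound ℓ ((PySem.Set.mem_ofList _ _).mp ((mem_vals label hnd ℓ).mpr ⟨k, hk⟩))
  have hfv : fresh ∉ PySem.Set.ofList label.values := by
    intro hm
    obtain ⟨k, hk⟩ := (mem_vals label hnd fresh).mp hm
    exact absurd (hboundE fresh k hk) (lt_irrefl fresh)
  have hmemc : ∀ y : Int, y ∈ (p.1 :: p.2).toFinset ↔ y ∈ p.1 :: p.2 := fun y =>
    List.mem_toFinset
  -- (iii) classes with a label not hit are unchanged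
  have hsame : ∀ ℓ, ℓ < fresh → ℓ ∉ bHit label (p.1 :: p.2) →
      classOf (bStep (label, fresh) p).1 ℓ = classOf label ℓ := by
    intro ℓ hlt hnh
    apply Finset.ext
    intro y
    rw [mem_classOf, mem_classOf, hg' y]
    by_cases hy : y ∈ p.1 :: p.2
    · rw [if_pos hy]
      constructor
      · intro h
        exact absurd (Option.some_inj.mp h) (by omega)
      · intro h
        exact absurd ((bHit_mem label _ ℓ).mpr ⟨y, hy, h⟩) hnh
    · rw [if_neg hy]
      cases hgy : label.get? y with
      | none => simp
      | some v =>
        simp only [Option.map_some, Option.some_inj]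
        by_cases hvh : v ∈ bHit label (p.1 :: p.2)
        · rw [if_pos hvh]
          constructor
          · intro h; omega
          · rintro rfl; exact absurd hvh hnh
        · rw [if_neg hvh]
  -- (iv) the fresh class is the merged one
  have hfreshclass : classOf (bStep (label, fresh) p).1 fresh =
      (((PySem.Set.ofList label.values).filter
          (fun ℓ => decide (ℓ ∈ bHit label (p.1 :: p.2)))).map (classOf label)).foldr
        (· ⊔ ·) (p.1 :: p.2).toFinset := by
    apply Finset.ext
    intro y
    rw [mem_classOf, hg' y, foldr_sup_mem]
    by_cases hy : y ∈ p.1 :: p.2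
    · simp only [if_pos hy]
      exact iff_of_true trivial (Or.inl (List.mem_toFinset.mpr hy))
    · rw [if_neg hy]
      constructor
      · intro h
        cases hgy : label.get? y with
        | none => rw [hgy] at h; cases h
        | some v =>
          rw [hgy] at h
          simp only [Option.map_some, Option.some_inj] at h
          have hvh : v ∈ bHit label (p.1 :: p.2) := by
            by_contra hvh
            rw [if_neg hvh] at h
            exact absurd (hboundE v y hgy) (by omega)
          right
          refine ⟨classOf label v, List.mem_map.mpr ⟨v, List.mem_filter.mpr
            ⟨(mem_vals label hnd v).mpr ⟨y, hgy⟩, by simp [hvh]⟩, rfl⟩, ?_⟩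
          exact (mem_classOf label v y).mpr hgy
      · rintro (h | ⟨t, ht, hyt⟩)
        · exact absurd (List.mem_toFinset.mp h) hy
        · obtain ⟨ℓ, hℓ, rfl⟩ := List.mem_map.mp ht
          have hℓhit : ℓ ∈ bHit label (p.1 :: p.2) := by
            have := (List.mem_filter.mp hℓ).2
            simpa using this
          have hgy := (mem_classOf label ℓ y).mp hyt
          rw [hgy]
          simp [hℓhit]
  -- (ii) disjointness from the new nodes ↔ the label was not hit
  have hdisj : ∀ ℓ, decide (Disjoint (classOf label ℓ) (p.1 :: p.2).toFinset)
      = !decide (ℓ ∈ bHit label (p.1 :: p.2)) := by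
    intro ℓ
    rw [Bool.eq_iff_iff]
    simp only [decide_eq_true_iff, Bool.not_eq_true', decide_eq_false_iff_not]
    constructor
    · intro h hhit
      obtain ⟨x, hx, hgx⟩ := (bHit_mem label _ ℓ).mp hhit
      exact (Finset.disjoint_left.mp h) ((mem_classOf label ℓ x).mpr hgx)
        (List.mem_toFinset.mpr hx)
    · intro h
      rw [Finset.disjoint_left]
      intro a ha hac
      exact h ((bHit_mem label _ ℓ).mpr ⟨a, List.mem_toFinset.mp hac,
        (mem_classOf label ℓ a).mp ha⟩)
  -- (v) the distinct label lists are a permutation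
  have hvalsperm : (PySem.Set.ofList (bStep (label, fresh) p).1.values).Perm
      (((PySem.Set.ofList label.values).filter
        (fun ℓ => !decide (ℓ ∈ bHit label (p.1 :: p.2)))) ++ [fresh]) := by
    apply (List.perm_ext_iff_of_nodup (PySem.Set.nodup_ofList _) ?_).mpr
    · intro ℓ
      rw [mem_vals _ hnd']
      constructor
      · rintro ⟨k, hk⟩
        rw [hg' k] at hk
        by_cases hkn : k ∈ p.1 :: p.2
        · rw [if_pos hkn, Option.some_inj] at hk
          subst hk
          simp
        · rw [if_neg hkn] at hk
          cases hgk : label.get? k with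
          | none => rw [hgk] at hk; cases hk
          | some v =>
            rw [hgk] at hk
            simp only [Option.map_some, Option.some_inj] at hk
            by_cases hvh : v ∈ bHit label (p.1 :: p.2)
            · rw [if_pos hvh] at hk; subst hk; simp
            · rw [if_neg hvh] at hk
              subst hk
              rw [List.mem_append, List.mem_filter]
              exact Or.inl ⟨(mem_vals label hnd v).mpr ⟨k, hgk⟩, by simp [hvh]⟩
      · intro hm
        rw [List.mem_append, List.mem_singleton] at hm
        rcases hm with hm | rfl
        · obtain ⟨hv, hnh⟩ := List.mem_filter.mp hm
          have hnh : ℓ ∉ bHit label (p.1 :: p.2) := by simpa using hnh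
          obtain ⟨k, hk⟩ := (mem_vals label hnd ℓ).mp hv
          refine ⟨k, ?_⟩
          rw [hg' k]
          have hkn : k ∉ p.1 :: p.2 := fun hkn =>
            hnh ((bHit_mem label _ ℓ).mpr ⟨k, hkn, hk⟩)
          rw [if_neg hkn, hk]
          simp [hnh]
        · exact ⟨p.1, by rw [hg' p.1, if_pos List.mem_cons_self]⟩
    · refine List.Nodup.append ((PySem.Set.nodup_ofList _).filter _)
        (List.nodup_singleton fresh) ?_
      intro a ha hb
      rw [List.mem_singleton] at hb
      subst hb
      exact hfv (List.mem_of_mem_filter ha)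
  have hlt : ∀ ℓ ∈ PySem.Set.ofList label.values, ℓ < fresh := by
    intro ℓ h
    obtain ⟨k, hk⟩ := (mem_vals label hnd ℓ).mp h
    exact hboundE ℓ k hk
  constructor
  · -- the permutation of class lists
    unfold LB
    refine (hvalsperm.map (classOf (bStep (label, fresh) p).1)).trans (List.Perm.of_eq ?_)
    rw [List.map_append, List.map_singleton, hfreshclass]
    unfold lstep
    rw [filter_map_eq, filter_map_eq]
    congr 1
    · rw [List.filter_congr (fun ℓ _ => hdisj ℓ)]
      apply List.map_congr_left
      intro ℓ hℓ
      have h1 := List.mem_of_mem_filter hℓ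
      have h2 := List.of_mem_filter hℓ
      exact hsame ℓ (hlt ℓ h1) (by simpa using h2)
    · have hcongr : (PySem.Set.ofList label.values).filter
          (fun a => !decide (Disjoint (classOf label a) (p.1 :: p.2).toFinset))
          = (PySem.Set.ofList label.values).filter
            (fun ℓ => decide (ℓ ∈ bHit label (p.1 :: p.2))) := by
        apply List.filter_congr
        intro ℓ _
        rw [hdisj ℓ, Bool.not_not]
      rw [hcongr]
  · refine ⟨hnd', ?_⟩
    intro v hv
    have hm : v ∈ PySem.Set.ofList (bStep (label, fresh) p).1.values :=
      (PySem.Set.mem_ofList _ _).mpr hv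
    obtain ⟨k, hk⟩ := (mem_vals _ hnd' v).mp hm
    rw [hg' k] at hk
    by_cases hkn : k ∈ p.1 :: p.2
    · rw [if_pos hkn, Option.some_inj] at hk
      show v < fresh + 1
      omega
    · rw [if_neg hkn] at hk
      cases hgk : label.get? k with
      | none => rw [hgk] at hk; cases hk
      | some w =>
        rw [hgk] at hk
        simp only [Option.map_some, Option.some_inj] at hk
        have hwlt := hboundE w k hgk
        show v < fresh + 1
        split at hk <;> omega

-- ---- main induction ----

lemma main_fold (input : List (Int × List Int)) (sets : List (PySem.Set Int))
    (label : PySem.Dict Int Int) (fresh : Int)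
    (hpa : PA sets) (hpb : PB label fresh) (h : (LA sets).Perm (LB label)) :
    PA (input.foldl (fun sets p => updateSets sets (PySem.Set.add (PySem.Set.ofList p.2) p.1)) sets) ∧
    PB (input.foldl bStep (label, fresh)).1 (input.foldl bStep (label, fresh)).2 ∧
    (LA (input.foldl (fun sets p => updateSets sets (PySem.Set.add (PySem.Set.ofList p.2) p.1)) sets)).Perm
      (LB (input.foldl bStep (label, fresh)).1) := by
  induction input generalizing sets label fresh with
  | nil => exact ⟨hpa, hpb, h⟩
  | cons p input ih =>
    rw [List.foldl_cons, List.foldl_cons]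
    have hcur : PySem.Set.add (PySem.Set.ofList p.2) p.1 ≠ [] ∧
        (PySem.Set.add (PySem.Set.ofList p.2) p.1).Nodup := by
      constructor
      · exact List.ne_nil_of_mem ((PySem.Set.mem_add _ _ _).mpr (Or.inr rfl))
      · exact PySem.Set.nodup_add _ _ (PySem.Set.nodup_ofList _)
    obtain ⟨hLA, hpa2⟩ := stepA_LA sets (PySem.Set.add (PySem.Set.ofList p.2) p.1) hpa hcur
    obtain ⟨hLB, hpb2⟩ := stepB_LB label fresh p hpb
    have hcc : (PySem.Set.add (PySem.Set.ofList p.2) p.1).toFinset = (p.1 :: p.2).toFinset := by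
      apply Finset.ext
      intro x
      rw [List.mem_toFinset, List.mem_toFinset, PySem.Set.mem_add, PySem.Set.mem_ofList,
        List.mem_cons]
      tauto
    have hperm2 : (LA (updateSets sets (PySem.Set.add (PySem.Set.ofList p.2) p.1))).Perm
        (LB (bStep (label, fresh) p).1) := by
      rw [hLA, hcc]
      exact (lstep_perm _ h).trans hLB.symm
    exact ih _ _ _ hpa2 hpb2 hperm2

lemma zero_covered (input : List (Int × List Int)) (sets : List (PySem.Set Int))
    (h : (∃ p ∈ input, p.1 = 0 ∨ 0 ∈ p.2) ∨ ∃ s ∈ sets, 0 ∈ s) :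
    ∃ s ∈ input.foldl (fun sets p => updateSets sets (PySem.Set.add (PySem.Set.ofList p.2) p.1)) sets, 0 ∈ s := by
  induction input generalizing sets with
  | nil =>
    rcases h with ⟨p, hp, _⟩ | h
    · simp at hp
    · exact h
  | cons p input ih =>
    rw [List.foldl_cons]
    apply ih
    rcases h with ⟨q, hq, hq0⟩ | ⟨s, hs, hs0⟩
    · rcases List.mem_cons.mp hq with rfl | hq
      · right
        apply mem_updateSets
        right
        rw [PySem.Set.mem_add, PySem.Set.mem_ofList]
        rcases hq0 with hq0 | hq0
        · exact Or.inr hq0.symm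
        · exact Or.inl hq0
      · exact Or.inl ⟨q, hq, hq0⟩
    · right
      exact mem_updateSets _ _ _ (Or.inl ⟨s, hs, hs0⟩)

-- ===== VERDICT (by name: the statement is the Claim_ definition above) =====
theorem solve_spec : Claim_equal_solve := by
  intro input _ hpre
  unfold Spec_solve
  have hinit_pa : PA ([] : List (PySem.Set Int)) := ⟨List.Pairwise.nil, by simp⟩
  have hinit_pb : PB PySem.Dict.empty 0 := by
    constructor
    · simp [PySem.Dict.keys, PySem.Dict.empty]
    · intro v hv
      simp [PySem.Dict.values, PySem.Dict.empty] at hv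
  have hinit_perm : (LA ([] : List (PySem.Set Int))).Perm (LB PySem.Dict.empty) := by
    simp [LA, LB, PySem.Dict.values, PySem.Dict.empty, PySem.Set.ofList]
  obtain ⟨hpaF, hpbF, hperm⟩ :=
    main_fold input [] PySem.Dict.empty 0 hinit_pa hinit_pb hinit_perm
  obtain ⟨s0, hs0mem, hs00⟩ := zero_covered input [] (Or.inl hpre)
  have hfind : ∃ s, (input.foldl
      (fun sets p => updateSets sets (PySem.Set.add (PySem.Set.ofList p.2) p.1)) []).find?
        (fun s => PySem.Set.contains s 0) = some s := by
    cases hf : (input.foldl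
        (fun sets p => updateSets sets (PySem.Set.add (PySem.Set.ofList p.2) p.1)) []).find?
          (fun s => PySem.Set.contains s 0) with
    | some s => exact ⟨s, rfl⟩
    | none =>
      exact absurd ((PySem.Set.contains_iff s0 0).mpr hs00)
        (by simpa using List.find?_eq_none.mp hf s0 hs0mem)
  obtain ⟨s, hs⟩ := hfind
  have hsmem := List.mem_of_find?_eq_some hs
  have hps := List.find?_some (p := fun s : PySem.Set Int => PySem.Set.contains s 0) hs
  have hs0 : 0 ∈ s := (PySem.Set.contains_iff s 0).mp hps
  have hsf : s.toFinset ∈ LB (input.foldl bStep (PySem.Dict.empty, 0)).1 :=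
    hperm.mem_iff.mp (List.mem_map.mpr ⟨s, hsmem, rfl⟩)
  obtain ⟨ℓ0, hℓ0v, hclass⟩ := List.mem_map.mp hsf
  have hz : (input.foldl bStep (PySem.Dict.empty, 0)).1.get? 0 = some ℓ0 :=
    (mem_classOf _ _ _).mp (by rw [hclass]; exact List.mem_toFinset.mpr hs0)
  have hcont : (input.foldl bStep (PySem.Dict.empty, 0)).1.contains 0 = true :=
    (contains_get? _ _).mpr ⟨ℓ0, hz⟩
  have hzl : (input.foldl bStep (PySem.Dict.empty, 0)).1.getD 0 0 = ℓ0 :=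
    PySem.Dict.getD_of_get?_eq_some _ 0 hz
  -- part 1: sizes of the two classes of node 0 agree
  have hcard : ((input.foldl bStep (PySem.Dict.empty, 0)).1.keys.filter
      (fun x => (input.foldl bStep (PySem.Dict.empty, 0)).1.getD x 0 == ℓ0)).length
      = s.length := by
    have h1 : classOf (input.foldl bStep (PySem.Dict.empty, 0)).1 ℓ0 = s.toFinset := hclass
    have h2 := congrArg Finset.card h1
    rw [classOf] at h2
    rw [List.toFinset_card_of_nodup (hpbF.1.filter _),
      List.toFinset_card_of_nodup (hpaF.2 s hsmem).2] at h2
    exact h2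
  -- part 2: the numbers of classes agree
  have hlen : (input.foldl
      (fun sets p => updateSets sets (PySem.Set.add (PySem.Set.ofList p.2) p.1)) []).length
      = (PySem.Set.ofList (input.foldl bStep (PySem.Dict.empty, 0)).1.values).length := by
    have := hperm.length_eq
    simpa [LA, LB] using this
  simp only [solve, solve_alt, hs, hcont, if_true, hzl]
  rw [Prod.mk.injEq]
  constructor
  · simp only [PySem.Set.len]
    exact_mod_cast hcard.symm
  · simp only [PySem.List.len_eq]
    exact_mod_cast hlen
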